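-- pv_equiv track=rewrite | github.com/PedroPDIN/Codewars_Kata_Resolution | Python/filter_coffee.py | search
-- ===== SOURCE A (Python) =====
-- def search(budget, prices):
--     result = ""
--
--     if len(prices) == 0:
--         return result
--
--     search_prices = []
--     for price in prices:
--         if price <= budget:
--             search_prices.append(price)
--
--     search_prices.sort()
--     search_prices_string = [str(int) for int in search_prices]
--     result = ",".join(search_prices_string)
--
--     return result
-- ===== SOURCE B (Python) =====
-- def search(budget, prices):
--     sp = sorted(prices)
--     lo, hi = 0, len(sp)
--     while lo < hi:
--         mid = (lo + hi) // 2
--         if sp[mid] <= budget: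
--             lo = mid + 1
--         else:
--             hi = mid
--     return ",".join(str(p) for p in sp[:lo])
-- ===== Notes on version B (the rewrite author's own statement) =====
-- stated objective: alternative
-- what changed: B sorts the whole list once and finds the budget boundary by a hand-written binary search (bisect_right), joining that prefix, instead of A's per-element filtering loop followed by sorting the filtered list.
import Mathlib
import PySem

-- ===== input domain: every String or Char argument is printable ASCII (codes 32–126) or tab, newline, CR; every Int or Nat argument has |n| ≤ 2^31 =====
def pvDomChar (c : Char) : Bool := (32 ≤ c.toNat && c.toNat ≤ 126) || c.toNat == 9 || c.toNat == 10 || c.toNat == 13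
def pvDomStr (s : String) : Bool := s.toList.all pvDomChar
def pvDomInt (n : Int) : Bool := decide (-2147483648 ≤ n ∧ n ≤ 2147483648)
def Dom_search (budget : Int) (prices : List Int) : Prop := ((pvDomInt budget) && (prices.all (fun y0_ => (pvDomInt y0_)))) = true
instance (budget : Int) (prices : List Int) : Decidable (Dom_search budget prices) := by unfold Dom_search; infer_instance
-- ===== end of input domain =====

-- B sorts the full list once and locates the budget boundary by binary search (bisect_right),
-- joining that sorted prefix, instead of A's filter-loop followed by sorting the filtered list.


-- ===== PORT A =====
def search (budget : Int) (prices : List Int) : String :=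
  let result := ""
  if prices.length == 0 then result
  else
    let search_prices := prices.foldl (fun acc price => if price ≤ budget then acc ++ [price] else acc) []
    let search_prices := PySem.List.sorted search_prices (fun x => x) false
    let search_prices_string := search_prices.map (fun n => PySem.Int.toStr n)
    PySem.Str.join "," search_prices_string

-- ===== PORT B =====
-- hand-written binary search loop of Source B (while lo < hi: mid = (lo+hi)//2; …)
def searchAltBisect (sp : List Int) (budget : Int) (lo hi : Nat) : Nat :=
  if _h : lo < hi then
    -- mid = (lo + hi) // 2, inlined
    if sp.getD ((lo + hi) / 2) 0 ≤ budget then searchAltBisect sp budget ((lo + hi) / 2 + 1) hi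
    else searchAltBisect sp budget lo ((lo + hi) / 2)
  else lo
termination_by hi - lo
decreasing_by all_goals omega

def search_alt (budget : Int) (prices : List Int) : String :=
  let sp := PySem.List.sorted prices (fun x => x) false
  let lo := searchAltBisect sp budget 0 sp.length
  PySem.Str.join "," ((PySem.List.slice sp none (some (lo : Int))).map (fun p => PySem.Int.toStr p))

-- ===== PRECONDITION & SPEC =====
def Spec_search (budget : Int) (prices : List Int) (out : String) : Prop := out = search_alt budget prices
instance (budget : Int) (prices : List Int) (out : String) : Decidable (Spec_search budget prices out) := by unfold Spec_search; infer_instance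

-- ===== CLAIM (what is proved, stated in full; the proofs are below) =====
def Claim_equal_search : Prop := ∀ (budget : Int) (prices : List Int), Dom_search budget prices → Spec_search budget prices (search budget prices)

-- ===== LEMMAS AND PROOFS =====

-- the binary search returns the bisect_right boundary: everything strictly before it is ≤ budget,
-- everything at or after it is > budget
theorem searchAltBisect_spec (sp : List Int) (budget : Int) (lo hi : Nat)
    (hlohi : lo ≤ hi) (hhi : hi ≤ sp.length)
    (hlo : ∀ j, j < lo → (hj : j < sp.length) → sp[j] ≤ budget)
    (hhi2 : ∀ j, hi ≤ j → (hj : j < sp.length) → budget < sp[j])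
    (hsorted : sp.Pairwise (· ≤ ·)) :
    searchAltBisect sp budget lo hi ≤ sp.length ∧
    (∀ j, j < searchAltBisect sp budget lo hi → (hj : j < sp.length) → sp[j] ≤ budget) ∧
    (∀ j, searchAltBisect sp budget lo hi ≤ j → (hj : j < sp.length) → budget < sp[j]) := by
  unfold searchAltBisect
  split
  · rename_i h
    have hmidlt : (lo + hi) / 2 < sp.length := by omega
    have hget : sp.getD ((lo + hi) / 2) 0 = sp[(lo + hi) / 2] := List.getD_eq_getElem sp 0 hmidlt
    rw [hget]
    have hpair := List.pairwise_iff_getElem.mp hsorted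
    split
    · rename_i hle
      exact searchAltBisect_spec sp budget ((lo + hi) / 2 + 1) hi (by omega) hhi
        (fun j hj hjl => by
          rcases Nat.lt_or_ge j ((lo + hi) / 2) with hc | hc
          · exact le_trans (hpair j ((lo + hi) / 2) hjl hmidlt hc) hle
          · have : j = (lo + hi) / 2 := by omega
            subst this; exact hle)
        hhi2 hsorted
    · rename_i hgt
      rw [not_le] at hgt
      exact searchAltBisect_spec sp budget lo ((lo + hi) / 2) (by omega) (by omega) hlo
        (fun j hj hjl => by
          rcases Nat.lt_or_ge ((lo + hi) / 2) j with hc | hc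
          · exact lt_of_lt_of_le hgt (hpair ((lo + hi) / 2) j hmidlt hjl hc)
          · have : j = (lo + hi) / 2 := by omega
            subst this; exact hgt)
        hsorted
  · rename_i h
    refine ⟨by omega, fun j hj hjl => hlo j (by omega) hjl, fun j hj hjl => hhi2 j (by omega) hjl⟩
termination_by hi - lo
decreasing_by all_goals omega

-- a ≤/>-split boundary turns filter into take
theorem filter_eq_take_of_bound (sp : List Int) (budget : Int) (k : Nat)
    (hk : k ≤ sp.length)
    (h1 : ∀ j, j < k → (hj : j < sp.length) → sp[j] ≤ budget)
    (h2 : ∀ j, k ≤ j → (hj : j < sp.length) → budget < sp[j]) :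
    sp.filter (fun x => decide (x ≤ budget)) = sp.take k := by
  induction sp generalizing k with
  | nil => simp
  | cons x xs ih =>
    cases k with
    | zero =>
      have hx : ∀ y ∈ x :: xs, budget < y := by
        intro y hy
        obtain ⟨j, hjl, rfl⟩ := List.mem_iff_getElem.mp hy
        exact h2 j (Nat.zero_le j) hjl
      simp only [List.take_zero]
      rw [List.filter_eq_nil_iff]
      intro y hy
      simp [not_le.mpr (hx y hy)]
    | succ k' =>
      have hx : x ≤ budget := h1 0 (Nat.succ_pos k') (by simp)
      simp only [List.take_succ_cons, List.filter_cons, decide_eq_true_eq, hx, if_pos]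
      congr 1
      exact ih k' (by simpa using hk)
        (fun j hj hjl => h1 (j + 1) (by omega) (by simpa using Nat.succ_lt_succ hjl))
        (fun j hj hjl => h2 (j + 1) (by omega) (by simpa using Nat.succ_lt_succ hjl))

-- ===== VERDICT (by name: the statement is the Claim_ definition above) =====
theorem search_spec : Claim_equal_search := by
  intro budget prices _
  unfold Spec_search search search_alt
  simp only []
  set sp := PySem.List.sorted prices (fun x => x) false with hsp
  have hsorted : sp.Pairwise (· ≤ ·) := PySem.List.sorted_pairwise prices (fun x => x)
  have hperm : sp.Perm prices := PySem.List.sorted_perm prices (fun x => x) false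
  set k := searchAltBisect sp budget 0 sp.length with hk
  obtain ⟨hk1, hk2, hk3⟩ := searchAltBisect_spec sp budget 0 sp.length (Nat.zero_le _) (le_refl _)
    (fun j hj _ => absurd hj (Nat.not_lt_zero j)) (fun j _ hjl => absurd hjl (by omega)) hsorted
  have hfil : sp.filter (fun x => decide (x ≤ budget)) = sp.take k :=
    filter_eq_take_of_bound sp budget k hk1 hk2 hk3
  have hslice : PySem.List.slice sp none (some (k : Int)) = sp.take k :=
    PySem.List.slice_to_natCast sp k
  rw [hslice]
  split
  · rename_i hnil
    have : prices = [] := by simpa using hnil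
    subst this
    have hspnil : sp = [] := by
      rw [hsp]; exact List.Perm.eq_nil (by simpa using hperm)
    rw [hspnil]
    simp [PySem.Str.join]
  · -- nonempty: A's filtered-then-sorted list equals the take-k prefix of the sorted list
    rw [PySem.List.foldl_append_ite_eq_filter (fun price => price ≤ budget) prices []]
    rw [List.nil_append]
    have hperm2 : (sp.take k).Perm (prices.filter (fun x => decide (x ≤ budget))) := by
      rw [← hfil]
      exact hperm.filter _
    have hpw : (sp.take k).Pairwise (· ≤ ·) := hsorted.sublist (List.take_sublist k sp)
    exact congrArg (fun l : List Int => PySem.Str.join "," (l.map (fun n => PySem.Int.toStr n)))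
      (PySem.List.sorted_id_eq_of_perm_of_pairwise _ _ hperm2 hpw)
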